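-- pv_equiv track=rewrite | github.com/groundhog-21/westmarch-house | westmarch/core/tagging.py | infer_domains
-- ===== SOURCE A (Python) =====
-- DOMAIN_KEYWORDS = {
--     # Literary & creative writing
--     "poetry": [
--         "poem", "poetry", "verse", "stanza", "line", "couplet", "sonnet",
--         "metaphor", "imagery", "languid moon"
--     ],
--
--     # Financial topics
--     "finance": [
--         "finance", "invest", "investing", "investment", "stock", "stocks",
--         "market", "fund", "funds", "etf", "etfs", "index fund",
--         "mutual fund", "portfolio", "capital"
--     ],
--
--     # Gnome incidents & garden mysteries
--     "gnome": [
--         "gnome", "garden gnome", "waistcoat", "green waistcoat",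
--         "horticultural", "paving stones", "wandering gnome"
--     ],
--
--     # Meteorological queries
--     "weather": [
--         "weather", "forecast", "rain", "sunny", "cloudy", "wind",
--         "temperature", "cold", "warm"
--     ],
--
--     # Daily agendas & planning
--     "schedule": [
--         "plan", "schedule", "agenda", "appointment",
--         "calendar", "daily plan", "itinerary"
--     ],
--
--     # Drafting & correspondence
--     "drafting": [
--         "email", "letter", "draft", "compose", "correspondence",
--         "write", "rewrite", "note"
--     ],
--
--     # Research queries (Perkins)
--     "research": [
--         "research", "investigate", "investigation", "analysis",
--         "summary", "report"
--     ],
--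
--     # Historical & archival material
--     "history": [
--         "history", "historical", "estate", "westmarch", "archive", "timeline"
--     ],
--
--     # General conversation (parlour interactions)
--     "parlour": [
--         "parlour", "chat", "conversation", "talk", "discuss"
--     ],
--
--     # Critique domain (Lady Hawthorne)
--     "critique": [
--         "critique", "appraisal", "assessment"
--     ],
--
--     # Sports (new domain per your instruction)
--     "sports": [
--         "sport", "sports", "tennis", "match", "tournament",
--         "score", "set", "athlete", "competition"
--     ]
-- }
--
-- def infer_domains(text: str) -> set[str]:
--     """
--     Infer semantic domains from a block of text.
--
--     Improvements:
--     - Handles multi-word phrases cleanly.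
--     - Uses whole-word matching for single tokens.
--     - Normalizes text for consistent comparisons.
--     """
--     t = text.lower()
--
--     # Normalized token set for whole-word matching
--     tokens = set(t.replace(",", " ").replace(".", " ").split())
--
--     found: set[str] = set()
--
--     for domain, keywords in DOMAIN_KEYWORDS.items():
--         for kw in keywords:
--             kw_lower = kw.lower()
--
--             # Case 1: multi-word phrase (“garden gnome”)
--             if " " in kw_lower:
--                 if kw_lower in t:       # non-fuzzy exact phrase match
--                     found.add(domain)
--                     break
--
--             # Case 2: single word (“gnome”, “fund”)
--             else:
--                 if kw_lower in tokens:
--                     found.add(domain)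
--                     break
--
--     return found
-- ===== SOURCE B (Python) =====
-- # Domains in the canonical order of the original table.
-- _DOMAINS = ["poetry", "finance", "gnome", "weather", "schedule", "drafting",
--             "research", "history", "parlour", "critique", "sports"]
--
-- # Single-word keywords per domain, kept as compact space-separated strings.
-- _SINGLE_WORDS = {
--     "poetry": "poem poetry verse stanza line couplet sonnet metaphor imagery",
--     "finance": "finance invest investing investment stock stocks market fund funds etf etfs portfolio capital",
--     "gnome": "gnome waistcoat horticultural",
--     "weather": "weather forecast rain sunny cloudy wind temperature cold warm",
--     "schedule": "plan schedule agenda appointment calendar itinerary",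
--     "drafting": "email letter draft compose correspondence write rewrite note",
--     "research": "research investigate investigation analysis summary report",
--     "history": "history historical estate westmarch archive timeline",
--     "parlour": "parlour chat conversation talk discuss",
--     "critique": "critique appraisal assessment",
--     "sports": "sport sports tennis match tournament score set athlete competition",
-- }
--
-- # Multi-word phrase keywords as (phrase, domain) pairs.
-- _PHRASES = [("languid moon", "poetry"), ("index fund", "finance"),
--             ("mutual fund", "finance"), ("garden gnome", "gnome"),
--             ("green waistcoat", "gnome"), ("paving stones", "gnome"),
--             ("wandering gnome", "gnome"), ("daily plan", "schedule")]
--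
-- # Inverted index built once at module load: word -> set of domains.
-- _INDEX: dict[str, set[str]] = {}
-- for _d, _ws in _SINGLE_WORDS.items():
--     for _w in _ws.split():
--         _INDEX.setdefault(_w, set()).add(_d)
--
--
-- def infer_domains(text: str) -> set[str]:
--     t = text.lower()
--     tokens = set(t.replace(",", " ").replace(".", " ").split())
--     hit: set[str] = set()
--     for tok in tokens:
--         hit |= _INDEX.get(tok, set())
--     for phrase, domain in _PHRASES:
--         if phrase in t:
--             hit.add(domain)
--     return {d for d in _DOMAINS if d in hit}
-- ===== Notes on version B (the rewrite author's own statement) =====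
-- stated objective: alternative
-- what changed: Replaces A's per-call double loop over all 11 domains x ~80 keywords by a module-load inverted index (word -> set of domains, built from compact per-domain keyword strings) consulted once per token of the text, plus one scan of the 8 multi-word phrase pairs; the result is emitted by a final membership filter over the canonical domain list.
import Mathlib
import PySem

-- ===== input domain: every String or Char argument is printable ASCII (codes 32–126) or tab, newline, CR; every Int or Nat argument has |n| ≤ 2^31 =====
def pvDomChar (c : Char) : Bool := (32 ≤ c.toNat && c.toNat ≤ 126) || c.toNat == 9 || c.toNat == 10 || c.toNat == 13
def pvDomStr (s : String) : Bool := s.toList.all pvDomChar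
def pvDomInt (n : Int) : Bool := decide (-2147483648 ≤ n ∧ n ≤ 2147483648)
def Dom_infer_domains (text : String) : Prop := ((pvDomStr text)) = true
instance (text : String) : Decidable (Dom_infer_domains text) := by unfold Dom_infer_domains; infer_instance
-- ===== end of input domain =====

-- B replaces A's keyword-driven double loop by an inverted index (word -> domain set), built once
-- from compact per-domain keyword strings and consulted per token, plus a small phrase scan
-- (alternative decomposition; return value only — A returns a set).


-- ===== PORT A =====
-- the module constant DOMAIN_KEYWORDS (dict → association list in insertion order)
def DOMAIN_KEYWORDS : List (String × List String) :=
  [ ("poetry", ["poem", "poetry", "verse", "stanza", "line", "couplet", "sonnet",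
                "metaphor", "imagery", "languid moon"]),
    ("finance", ["finance", "invest", "investing", "investment", "stock", "stocks",
                 "market", "fund", "funds", "etf", "etfs", "index fund",
                 "mutual fund", "portfolio", "capital"]),
    ("gnome", ["gnome", "garden gnome", "waistcoat", "green waistcoat",
               "horticultural", "paving stones", "wandering gnome"]),
    ("weather", ["weather", "forecast", "rain", "sunny", "cloudy", "wind",
                 "temperature", "cold", "warm"]),
    ("schedule", ["plan", "schedule", "agenda", "appointment",
                  "calendar", "daily plan", "itinerary"]),
    ("drafting", ["email", "letter", "draft", "compose", "correspondence",
                  "write", "rewrite", "note"]),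
    ("research", ["research", "investigate", "investigation", "analysis",
                  "summary", "report"]),
    ("history", ["history", "historical", "estate", "westmarch", "archive", "timeline"]),
    ("parlour", ["parlour", "chat", "conversation", "talk", "discuss"]),
    ("critique", ["critique", "appraisal", "assessment"]),
    ("sports", ["sport", "sports", "tennis", "match", "tournament",
                "score", "set", "athlete", "competition"]) ]

-- A's inner 'for kw in keywords: … break' — returns true at the first matching keyword
def scanKws (t : String) (tokens : PySem.Set String) : List String → Bool
  | [] => false
  | kw :: rest =>
    let kl := PySem.Str.lower kw
    if PySem.Str.isIn " " kl then
      if PySem.Str.isIn kl t then true else scanKws t tokens rest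
    else
      if PySem.Set.contains tokens kl then true else scanKws t tokens rest

def infer_domains (text : String) : List String :=
  let t := PySem.Str.lower text
  let tokens : PySem.Set String :=
    PySem.Set.ofList (PySem.Str.split₀ (PySem.Str.replace (PySem.Str.replace t "," " ") "." " "))
  DOMAIN_KEYWORDS.foldl
    (fun found dk => if scanKws t tokens dk.2 then PySem.Set.add found dk.1 else found)
    PySem.Set.empty

-- ===== PORT B =====
-- B's module data: domains in canonical order, compact single-word strings, phrase pairs
def DOMAINS_B : List String :=
  ["poetry", "finance", "gnome", "weather", "schedule", "drafting",
   "research", "history", "parlour", "critique", "sports"]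

def SINGLE_WORDS_B : List (String × String) :=
  [ ("poetry", "poem poetry verse stanza line couplet sonnet metaphor imagery"),
    ("finance", "finance invest investing investment stock stocks market fund funds etf etfs portfolio capital"),
    ("gnome", "gnome waistcoat horticultural"),
    ("weather", "weather forecast rain sunny cloudy wind temperature cold warm"),
    ("schedule", "plan schedule agenda appointment calendar itinerary"),
    ("drafting", "email letter draft compose correspondence write rewrite note"),
    ("research", "research investigate investigation analysis summary report"),
    ("history", "history historical estate westmarch archive timeline"),
    ("parlour", "parlour chat conversation talk discuss"),
    ("critique", "critique appraisal assessment"),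
    ("sports", "sport sports tennis match tournament score set athlete competition") ]

def PHRASES_B : List (String × String) :=
  [("languid moon", "poetry"), ("index fund", "finance"),
   ("mutual fund", "finance"), ("garden gnome", "gnome"),
   ("green waistcoat", "gnome"), ("paving stones", "gnome"),
   ("wandering gnome", "gnome"), ("daily plan", "schedule")]

-- module-load loop: _INDEX.setdefault(w, set()).add(d)  (ported as Dict.modify, exact)
def wordIndexB : PySem.Dict String (PySem.Set String) :=
  SINGLE_WORDS_B.foldl
    (fun d dw => (PySem.Str.split₀ dw.2).foldl
      (fun d w => d.modify w PySem.Set.empty (fun s => PySem.Set.add s dw.1)) d)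
    PySem.Dict.empty

def infer_domains_alt (text : String) : List String :=
  let t := PySem.Str.lower text
  let tokens : PySem.Set String :=
    PySem.Set.ofList (PySem.Str.split₀ (PySem.Str.replace (PySem.Str.replace t "," " ") "." " "))
  let hit : PySem.Set String :=
    tokens.foldl (fun h tok => PySem.Set.union h (wordIndexB.getD tok PySem.Set.empty)) PySem.Set.empty
  let hit : PySem.Set String :=
    PHRASES_B.foldl (fun h pd => if PySem.Str.isIn pd.1 t then PySem.Set.add h pd.2 else h) hit
  DOMAINS_B.filter (fun d => PySem.Set.contains hit d)

-- ===== PRECONDITION & SPEC =====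
def Spec_infer_domains (text : String) (out : List String) : Prop := out = infer_domains_alt text
instance (text : String) (out : List String) : Decidable (Spec_infer_domains text out) := by unfold Spec_infer_domains; infer_instance

-- ===== CLAIM (what is proved, stated in full; the proofs are below) =====
def Claim_equal_infer_domains : Prop := ∀ (text : String), Dom_infer_domains text → Spec_infer_domains text (infer_domains text)



-- ===== LEMMAS AND PROOFS =====

-- proof device: A's table flattened into (lowered phrase, domain) pairs, the old comprehension shape
def aPhrases : List (String × String) :=
  DOMAIN_KEYWORDS.flatMap
    (fun dk => ((dk.2.filter (fun kw => PySem.Str.isIn " " (PySem.Str.lower kw))).map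
      (fun kw => (PySem.Str.lower kw, dk.1))))

-- proof device: A's table flattened into (single word, domain) pairs
def aSingles : List (String × String) :=
  DOMAIN_KEYWORDS.flatMap
    (fun dk => ((dk.2.filter (fun kw => !(PySem.Str.isIn " " (PySem.Str.lower kw)))).map
      (fun kw => (PySem.Str.lower kw, dk.1))))

-- B's precomputed data coincides with the same data extracted from A's table
set_option maxRecDepth 40000 in
set_option maxHeartbeats 1600000 in
theorem pairs_eq :
    SINGLE_WORDS_B.flatMap (fun dw => (PySem.Str.split₀ dw.2).map (fun w => (w, dw.1)))
      = aSingles := by decide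

set_option maxRecDepth 40000 in
set_option maxHeartbeats 1600000 in
theorem phrases_eq : PHRASES_B = aPhrases := by decide

theorem domains_eq : DOMAINS_B = DOMAIN_KEYWORDS.map Prod.fst := by decide

-- Bool shape of one step of A's inner loop vs the corresponding 'any' step
theorem if_or_helper (c d e x : Bool) :
    (if c then (if d then true else x) else (if e then true else x))
      = ((if c then d else e) || x) := by
  cases c <;> cases d <;> cases e <;> cases x <;> rfl

-- A's accumulation loop over the domain table is the filter of matching domains
theorem foldl_add_filter (p : String × List String → Bool) :
    ∀ (l : List (String × List String)) (acc : PySem.Set String),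
    (l.map Prod.fst).Nodup → (∀ dk ∈ l, dk.1 ∉ acc) →
    l.foldl (fun found dk => if p dk then PySem.Set.add found dk.1 else found) acc
      = acc ++ (l.filter p).map Prod.fst
  | [], acc, _, _ => by simp
  | dk :: rest, acc, hnd, hdisj => by
    simp only [List.map_cons, List.nodup_cons] at hnd
    by_cases hp : p dk
    · have hnm : dk.1 ∉ acc := hdisj dk (List.mem_cons_self)
      have step : PySem.Set.add acc dk.1 = acc ++ [dk.1] := PySem.Set.add_of_not_mem hnm
      have ih := foldl_add_filter p rest (acc ++ [dk.1]) hnd.2 (by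
        intro dk' h'
        simp only [List.mem_append, List.mem_singleton]
        rintro (h | h)
        · exact hdisj dk' (List.mem_cons_of_mem _ h') h
        · exact hnd.1 (h ▸ List.mem_map_of_mem h'))
      simp [hp, step, ih]
    · have ih := foldl_add_filter p rest acc hnd.2
        (fun dk' h' => hdisj dk' (List.mem_cons_of_mem _ h'))
      simp [hp, ih]

-- A's inner break-loop is an 'any' over the keywords
theorem scan_eq_any (t : String) (tokens : PySem.Set String) :
    ∀ kws : List String, scanKws t tokens kws
      = kws.any (fun kw =>
          let kl := PySem.Str.lower kw
          if PySem.Str.isIn " " kl then PySem.Str.isIn kl t else PySem.Set.contains tokens kl)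
  | [] => rfl
  | kw :: rest => by
    simp only [scanKws, List.any_cons, scan_eq_any t tokens rest]
    exact if_or_helper _ _ _ _

-- membership in B's token-driven union loop
theorem mem_foldl_union (f : String → PySem.Set String) (y : String) :
    ∀ (l : List String) (h0 : PySem.Set String),
    (y ∈ l.foldl (fun h tok => PySem.Set.union h (f tok)) h0) ↔ y ∈ h0 ∨ ∃ tok ∈ l, y ∈ f tok
  | [], h0 => by simp
  | tok :: rest, h0 => by
    simp only [List.foldl_cons, mem_foldl_union f y rest, PySem.Set.mem_union,
      List.mem_cons, exists_eq_or_imp]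
    tauto

-- membership in B's phrase loop
theorem mem_foldl_add_if (q : String × String → Bool) (y : String) :
    ∀ (l : List (String × String)) (h0 : PySem.Set String),
    (y ∈ l.foldl (fun h pd => if q pd then PySem.Set.add h pd.2 else h) h0)
      ↔ y ∈ h0 ∨ ∃ pd ∈ l, q pd ∧ y = pd.2
  | [], h0 => by simp
  | pd :: rest, h0 => by
    by_cases hq : q pd
    · rw [List.foldl_cons, if_pos hq, mem_foldl_add_if q y rest]
      simp only [PySem.Set.mem_add, List.mem_cons, exists_eq_or_imp, hq]
      tauto
    · rw [List.foldl_cons, if_neg hq, mem_foldl_add_if q y rest]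
      simp only [List.mem_cons, exists_eq_or_imp, hq]
      tauto

-- membership after the inner index-building loop of one domain of B
theorem mem_getD_innerB (dom tok dom' : String) (ws : List String) :
    ∀ (d0 : PySem.Dict String (PySem.Set String)),
    (dom' ∈ (ws.foldl
        (fun d w => d.modify w PySem.Set.empty (fun s => PySem.Set.add s dom)) d0).getD
        tok PySem.Set.empty)
      ↔ dom' ∈ d0.getD tok PySem.Set.empty ∨ (dom' = dom ∧ tok ∈ ws) := by
  induction ws with
  | nil => intro d0; simp
  | cons w rest ih =>
    intro d0
    rw [List.foldl_cons, ih _, PySem.Dict.getD_modify]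
    by_cases htok : tok = w
    · subst htok
      rw [if_pos rfl]
      constructor
      · rintro (hmem | ⟨he, hm⟩)
        · rcases (PySem.Set.mem_add _ _ _).mp hmem with h | he
          · exact Or.inl h
          · exact Or.inr ⟨he, List.mem_cons_self⟩
        · exact Or.inr ⟨he, List.mem_cons_of_mem _ hm⟩
      · rintro (h | ⟨he, hm⟩)
        · exact Or.inl ((PySem.Set.mem_add _ _ _).mpr (Or.inl h))
        · rcases List.mem_cons.mp hm with _ | hm'
          · exact Or.inl ((PySem.Set.mem_add _ _ _).mpr (Or.inr he))
          · exact Or.inr ⟨he, hm'⟩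
    · rw [if_neg htok]
      constructor
      · rintro (h | ⟨he, hm⟩)
        · exact Or.inl h
        · exact Or.inr ⟨he, List.mem_cons_of_mem _ hm⟩
      · rintro (h | ⟨he, hm⟩)
        · exact Or.inl h
        · rcases List.mem_cons.mp hm with rfl | hm'
          · exact absurd rfl htok
          · exact Or.inr ⟨he, hm'⟩

-- membership in the whole inverted index (generic in the table)
theorem mem_getD_buildB (tok dom' : String) (l : List (String × String)) :
    ∀ (d0 : PySem.Dict String (PySem.Set String)),
    (dom' ∈ (l.foldl
        (fun d dw => (PySem.Str.split₀ dw.2).foldl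
          (fun d w => d.modify w PySem.Set.empty (fun s => PySem.Set.add s dw.1)) d)
        d0).getD tok PySem.Set.empty)
      ↔ dom' ∈ d0.getD tok PySem.Set.empty
        ∨ ∃ dw ∈ l, dw.1 = dom' ∧ tok ∈ PySem.Str.split₀ dw.2 := by
  induction l with
  | nil => intro d0; simp
  | cons dw rest ih =>
    intro d0
    rw [List.foldl_cons, ih _, mem_getD_innerB dw.1 tok dom']
    constructor
    · rintro ((h | ⟨he, hm⟩) | ⟨dw', hm', hex'⟩)
      · exact Or.inl h
      · exact Or.inr ⟨dw, List.mem_cons_self, he.symm, hm⟩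
      · exact Or.inr ⟨dw', List.mem_cons_of_mem _ hm', hex'⟩
    · rintro (h | ⟨dw', hm', he, hex⟩)
      · exact Or.inl (Or.inl h)
      · rcases List.mem_cons.mp hm' with rfl | hm''
        · exact Or.inl (Or.inr ⟨he.symm, hex⟩)
        · exact Or.inr ⟨dw', hm'', he, hex⟩

-- B's index looked up at a token, phrased over A's table (via the decided pairs_eq bridge)
theorem mem_getD_wordIndexB (tok dom' : String) :
    dom' ∈ wordIndexB.getD tok PySem.Set.empty
      ↔ ∃ dk ∈ DOMAIN_KEYWORDS, dk.1 = dom' ∧ ∃ kw ∈ dk.2,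
          ¬ (PySem.Str.isIn " " (PySem.Str.lower kw) = true) ∧ PySem.Str.lower kw = tok := by
  rw [wordIndexB, mem_getD_buildB]
  simp only [PySem.Dict.getD_empty, PySem.Set.empty, List.not_mem_nil, false_or]
  have hmemL : (∃ dw ∈ SINGLE_WORDS_B, dw.1 = dom' ∧ tok ∈ PySem.Str.split₀ dw.2)
      ↔ (tok, dom') ∈ SINGLE_WORDS_B.flatMap
          (fun dw => (PySem.Str.split₀ dw.2).map (fun w => (w, dw.1))) := by
    simp only [List.mem_flatMap, List.mem_map]
    constructor
    · rintro ⟨dw, hdw, he, htok⟩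
      exact ⟨dw, hdw, tok, htok, by rw [he]⟩
    · rintro ⟨dw, hdw, w, hw, heq⟩
      obtain ⟨h1, h2⟩ := Prod.mk.injEq _ _ _ _ ▸ heq
      exact ⟨dw, hdw, h2, h1 ▸ hw⟩
  rw [hmemL, pairs_eq, aSingles]
  simp only [List.mem_flatMap, List.mem_map, List.mem_filter]
  constructor
  · rintro ⟨dk, hdk, kw, ⟨hm, hsp⟩, heq⟩
    obtain ⟨h1, h2⟩ := Prod.mk.injEq _ _ _ _ ▸ heq
    refine ⟨dk, hdk, h2, kw, hm, ?_, h1⟩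
    revert hsp; cases PySem.Str.isIn " " (PySem.Str.lower kw) <;> simp
  · rintro ⟨dk, hdk, he, kw, hm, hsp, hlow⟩
    refine ⟨dk, hdk, kw, ⟨hm, ?_⟩, by rw [hlow, he]⟩
    revert hsp; cases PySem.Str.isIn " " (PySem.Str.lower kw) <;> simp

theorem mem_aPhrases (pd : String × String) :
    pd ∈ aPhrases ↔ ∃ dk ∈ DOMAIN_KEYWORDS, ∃ kw ∈ dk.2,
      PySem.Str.isIn " " (PySem.Str.lower kw) = true ∧ pd = (PySem.Str.lower kw, dk.1) := by
  simp only [aPhrases, List.mem_flatMap, List.mem_map, List.mem_filter]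
  constructor
  · rintro ⟨dk, hdk, kw, ⟨hm, hsp⟩, hpd⟩; exact ⟨dk, hdk, kw, hm, hsp, hpd.symm⟩
  · rintro ⟨dk, hdk, kw, hm, hsp, hpd⟩; exact ⟨dk, hdk, kw, ⟨hm, hsp⟩, hpd.symm⟩

theorem mem_phrasesB (pd : String × String) :
    pd ∈ PHRASES_B ↔ ∃ dk ∈ DOMAIN_KEYWORDS, ∃ kw ∈ dk.2,
      PySem.Str.isIn " " (PySem.Str.lower kw) = true ∧ pd = (PySem.Str.lower kw, dk.1) := by
  rw [phrases_eq]; exact mem_aPhrases pd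

theorem domain_firsts_nodup : (DOMAIN_KEYWORDS.map Prod.fst).Nodup := by decide

-- the two match tests agree on every domain of the table
set_option maxHeartbeats 1600000 in
theorem match_agree (t : String) (tokens : PySem.Set String) (dk : String × List String)
    (hdk : dk ∈ DOMAIN_KEYWORDS) :
    scanKws t tokens dk.2
      = PySem.Set.contains
          (PHRASES_B.foldl
            (fun h pd => if PySem.Str.isIn pd.1 t then PySem.Set.add h pd.2 else h)
            (tokens.foldl (fun h tok => PySem.Set.union h (wordIndexB.getD tok PySem.Set.empty))
              PySem.Set.empty))
          dk.1 := by
  apply Bool.coe_iff_coe.mp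
  rw [scan_eq_any, PySem.Set.contains_iff, mem_foldl_add_if, mem_foldl_union, List.any_eq_true]
  simp only [PySem.Set.empty, List.not_mem_nil, false_or]
  constructor
  · rintro ⟨kw, hkw, hmatch⟩
    by_cases hsp : PySem.Str.isIn " " (PySem.Str.lower kw) = true
    · rw [if_pos hsp] at hmatch
      refine Or.inr ⟨(PySem.Str.lower kw, dk.1), ?_, hmatch, rfl⟩
      exact (mem_phrasesB _).mpr ⟨dk, hdk, kw, hkw, hsp, rfl⟩
    · rw [if_neg hsp] at hmatch
      refine Or.inl ⟨PySem.Str.lower kw, (PySem.Set.contains_iff _ _).mp hmatch, ?_⟩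
      exact (mem_getD_wordIndexB _ _).mpr ⟨dk, hdk, rfl, kw, hkw, hsp, rfl⟩
  · rintro (⟨tok, htok, hmem⟩ | ⟨pd, hpd, hin, heq⟩)
    · obtain ⟨dk', hdk', he, kw, hkw, hsp, hlow⟩ := (mem_getD_wordIndexB _ _).mp hmem
      have hd : dk' = dk := List.inj_on_of_nodup_map domain_firsts_nodup hdk' hdk he
      subst hd
      refine ⟨kw, hkw, ?_⟩
      rw [if_neg hsp]
      exact (PySem.Set.contains_iff _ _).mpr (hlow ▸ htok)
    · obtain ⟨dk', hdk', kw, hkw, hsp, hpd'⟩ := (mem_phrasesB _).mp hpd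
      have he2 : dk'.1 = dk.1 := by rw [hpd'] at heq; exact heq.symm
      have hd : dk' = dk := List.inj_on_of_nodup_map domain_firsts_nodup hdk' hdk he2
      subst hd
      refine ⟨kw, hkw, ?_⟩
      rw [if_pos hsp]
      rw [hpd'] at hin
      exact hin

-- the two ports agree once the shared text/token values are abstracted
set_option maxHeartbeats 1600000 in
theorem main_eq (t : String) (tokens : PySem.Set String) :
    DOMAIN_KEYWORDS.foldl
        (fun found dk => if scanKws t tokens dk.2 then PySem.Set.add found dk.1 else found)
        PySem.Set.empty
      = DOMAINS_B.filter
          (fun d => PySem.Set.contains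
            (PHRASES_B.foldl
              (fun h pd => if PySem.Str.isIn pd.1 t then PySem.Set.add h pd.2 else h)
              (tokens.foldl
                (fun h tok => PySem.Set.union h (wordIndexB.getD tok PySem.Set.empty))
                PySem.Set.empty))
            d) := by
  rw [domains_eq]
  rw [foldl_add_filter _ DOMAIN_KEYWORDS PySem.Set.empty domain_firsts_nodup
    (by intro dk h; simp [PySem.Set.empty])]
  rw [List.filter_map]
  simp only [PySem.Set.empty, List.nil_append]
  congr 1
  apply List.filter_congr
  intro dk hdk
  simp only [Function.comp_apply]
  exact match_agree t tokens dk hdk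

-- ===== VERDICT (by name: the statement is the Claim_ definition above) =====
theorem infer_domains_spec : Claim_equal_infer_domains := by
  intro text _
  show infer_domains text = infer_domains_alt text
  rw [infer_domains, infer_domains_alt]
  exact main_eq _ _
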